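-- pv_equiv track=rewrite | github.com/asandova/Manga-Desktop-Reader | auto_downloader.py | extract_name_from_url
-- ===== SOURCE A (Python) =====
-- def extract_name_from_url(url):
--     temp = ""
--     for c in url:
--         if c == '/':
--             temp = ""
--         else:
--             temp += c
--     return temp
-- ===== SOURCE B (Python) =====
-- def extract_name_from_url(url):
--     i = url.rfind('/')
--     return url[i + 1:]
-- ===== Notes on version B (the rewrite author's own statement) =====
-- stated objective: faster
-- what changed: Replaces the forward character-by-character accumulation loop (which rebuilds the string by repeated concatenation, resetting at each slash) with locating the last slash via rfind and slicing the suffix after it.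
import Mathlib
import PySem

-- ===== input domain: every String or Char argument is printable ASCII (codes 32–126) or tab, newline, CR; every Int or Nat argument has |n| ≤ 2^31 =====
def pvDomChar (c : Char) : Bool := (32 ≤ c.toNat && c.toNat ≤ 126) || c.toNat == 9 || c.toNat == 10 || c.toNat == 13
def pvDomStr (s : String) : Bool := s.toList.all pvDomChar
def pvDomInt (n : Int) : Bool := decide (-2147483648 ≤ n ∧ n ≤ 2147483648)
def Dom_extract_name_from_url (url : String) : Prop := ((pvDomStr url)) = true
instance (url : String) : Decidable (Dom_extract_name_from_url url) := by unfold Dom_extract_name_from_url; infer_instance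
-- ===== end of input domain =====

-- B locates the last slash with rfind and slices the suffix after it, instead of A's forward accumulation loop; measured faster; equal return values on all strings.

-- ===== PORT A =====
def extract_name_from_url (url : String) : String :=
  String.ofList (url.toList.foldl (fun temp c => if c == '/' then [] else temp ++ [c]) [])

-- ===== PORT B =====
def extract_name_from_url_alt (url : String) : String :=
  PySem.Str.slice url (some (PySem.Str.rfind url "/" + 1)) none

-- ===== PRECONDITION & SPEC =====
def Spec_extract_name_from_url (url : String) (out : String) : Prop := out = extract_name_from_url_alt url
instance (url : String) (out : String) : Decidable (Spec_extract_name_from_url url out) := by unfold Spec_extract_name_from_url; infer_instance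

-- ===== CLAIM (what is proved, stated in full; the proofs are below) =====
def Claim_equal_extract_name_from_url : Prop := ∀ (url : String), Dom_extract_name_from_url url → Spec_extract_name_from_url url (extract_name_from_url url)

-- ===== LEMMAS AND PROOFS =====

-- A's loop computes the reversed longest slash-free suffix.
theorem pvLoopA_eq (l : List Char) :
    l.foldl (fun temp c => if c == '/' then [] else temp ++ [c]) [] =
      (l.reverse.takeWhile (fun c => !(c == '/'))).reverse := by
  induction l using List.reverseRecOn with
  | nil => simp
  | append_singleton l c ih =>
    rw [List.foldl_append]
    simp only [List.foldl_cons, List.foldl_nil, List.reverse_append, List.reverse_singleton,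
      List.singleton_append, List.takeWhile_cons]
    by_cases h : c = '/'
    · simp [h]
    · simpa [h] using ih

-- rfind.go (single-char needle) characterised: dropping past the last '/' found among indices ≤ j.
theorem pvGo_spec (s : List Char) (j : Nat) (hj : j ≤ s.length) :
    s.drop ((PySem.Chars.rfind.go s ['/'] j + 1).toNat) =
      ((s.take (j + 1)).reverse.takeWhile (fun c => !(c == '/'))).reverse ++ s.drop (j + 1) := by
  induction j with
  | zero =>
    cases s with
    | nil => simp [PySem.Chars.rfind.go]
    | cons c t =>
      by_cases h : c = '/'
      · simp [PySem.Chars.rfind.go, List.isPrefixOf, h]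
      · simp only [PySem.Chars.rfind.go, List.isPrefixOf, Bool.and_true]
        rw [if_neg (by simp; exact fun hh => h hh.symm)]
        simp [h]
  | succ j ih =>
    have hgo : PySem.Chars.rfind.go s ['/'] (j + 1) =
        if ['/'].isPrefixOf (s.drop (j + 1)) then ((j : Int) + 1) else PySem.Chars.rfind.go s ['/'] j := by
      simp [PySem.Chars.rfind.go]
    by_cases hlt : j + 1 < s.length
    · have hdrop : s.drop (j + 1) = s[j + 1] :: s.drop (j + 2) := by
        rw [List.drop_eq_getElem_cons hlt]
      have htake : s.take (j + 2) = s.take (j + 1) ++ [s[j + 1]] := by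
        rw [List.take_add_one]
        simp [List.getElem?_eq_getElem hlt]
      by_cases hc : s[j + 1] = '/'
      · rw [hgo, hdrop]
        simp only [hc, List.isPrefixOf, beq_self_eq_true, Bool.true_and, if_pos]
        have : ((j : Int) + 1 + 1).toNat = j + 2 := by omega
        rw [this, htake]
        simp [hc]
      · rw [hgo]
        rw [if_neg (by rw [hdrop]; simp [List.isPrefixOf]; exact fun hh => hc hh.symm)]
        rw [ih (by omega), htake]
        rw [hdrop]
        simp only [List.reverse_append, List.reverse_cons, List.reverse_nil, List.nil_append,
          List.singleton_append, List.takeWhile_cons]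
        have hb : (!(s[j + 1] == '/')) = true := by simp [hc]
        rw [hb]
        simp
    · have hlen : j + 1 = s.length ∨ j + 1 > s.length := by omega
      have hlen' : s.length ≤ j + 1 := by omega
      have hdrop : s.drop (j + 1) = [] := List.drop_eq_nil_of_le hlen'
      rw [hgo, hdrop]
      simp only [List.isPrefixOf, Bool.false_eq_true, if_false]
      rw [ih (by omega)]
      rw [List.take_of_length_le (l := s) (i := j + 1) hlen',
          List.take_of_length_le (l := s) (i := j + 2) (by omega),
          List.drop_eq_nil_of_le (as := s) (i := j + 1) hlen',
          List.drop_eq_nil_of_le (as := s) (i := j + 2) (by omega)]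

theorem pvRfind_drop (s : List Char) :
    s.drop ((PySem.Chars.rfind s ['/'] + 1).toNat) =
      (s.reverse.takeWhile (fun c => !(c == '/'))).reverse := by
  have h := pvGo_spec s s.length (le_refl _)
  rw [List.take_of_length_le (l := s) (i := s.length + 1) (by omega),
    List.drop_eq_nil_of_le (as := s) (i := s.length + 1) (by omega), List.append_nil] at h
  simpa [PySem.Chars.rfind] using h

theorem pvGo_ge (s sub : List Char) (j : Nat) : -1 ≤ PySem.Chars.rfind.go s sub j := by
  induction j with
  | zero => simp only [PySem.Chars.rfind.go]; split <;> omega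
  | succ j ih => simp only [PySem.Chars.rfind.go]; split <;> omega

-- ===== VERDICT (by name: the statement is the Claim_ definition above) =====
theorem extract_name_from_url_spec : Claim_equal_extract_name_from_url := by
  intro url _
  unfold Spec_extract_name_from_url extract_name_from_url extract_name_from_url_alt
  have hsl : "/".toList = ['/'] := by decide
  have hge : (0 : Int) ≤ PySem.Str.rfind url "/" + 1 := by
    have := pvGo_ge url.toList "/".toList url.toList.length
    simp only [PySem.Str.rfind, PySem.Chars.rfind]
    omega
  rw [PySem.Str.slice, PySem.Chars.slice_eq_listSlice, PySem.List.slice_from _ hge]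
  apply String.toList_inj.mp
  simp only [String.toList_ofList]
  rw [pvLoopA_eq]
  have h := pvRfind_drop url.toList
  simpa [PySem.Str.rfind, hsl] using h.symm
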